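-- pv_equiv track=rewrite | github.com/JarningGau/darlinpy | bin/old/run_DARLIN_bulk_v2.py | collapse_within_hd
-- ===== SOURCE A (Python) =====
-- def hamming_dist(a: str, b: str) -> int:
--     """Return Hamming distance (requires equal length)."""
--     if len(a) != len(b):
--         return max(len(a), len(b))  # treat unequal length as very large
--     return sum(c1 != c2 for c1, c2 in zip(a, b))
--
-- def collapse_within_hd(items, max_hd: int):
--     """
--     Like collapse_directional but allows Hamming distance <= max_hd (>=2 typical).
--     Naive O(n^2) within a group, which is OK because we operate per-UMI buckets.
--     """
--     counts = dict(items)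
--     seqs = sorted(counts, key=lambda s: counts[s], reverse=True)
--     parent = {s: s for s in seqs}
--
--     for i, s in enumerate(seqs):
--         if parent[s] != s:
--             continue
--         c_hi = counts[s]
--         # only consider candidates not yet absorbed
--         for t in seqs[i+1:]:
--             if parent[t] != t:
--                 continue
--             if len(t) != len(s):
--                 continue
--             if hamming_dist(s, t) <= max_hd:
--                 c_lo = counts[t]
--                 if c_hi >= 2 * c_lo - 1:
--                     parent[t] = s
--     return parent
-- ===== SOURCE B (Python) =====
-- def hamming_dist(a: str, b: str) -> int:
--     """Return Hamming distance (requires equal length)."""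
--     if len(a) != len(b):
--         return max(len(a), len(b))  # treat unequal length as very large
--     return sum(c1 != c2 for c1, c2 in zip(a, b))
--
-- def collapse_within_hd(items, max_hd: int):
--     # One pass: each sequence is either absorbed by the first earlier root that
--     # dominates it, or becomes a new root itself.
--     counts = dict(items)
--     seqs = sorted(counts, key=lambda s: counts[s], reverse=True)
--     roots = []
--     parent = {}
--     for s in seqs:
--         c_lo = counts[s]
--         r = next((r for r in roots
--                   if len(r) == len(s)
--                   and hamming_dist(r, s) <= max_hd
--                   and counts[r] >= 2 * c_lo - 1), None)
--         if r is None: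
--             roots.append(s)
--             parent[s] = s
--         else:
--             parent[s] = r
--     return parent
-- ===== Notes on version B (the rewrite author's own statement) =====
-- stated objective: alternative
-- what changed: Replaces A's nested scan that mutates a parent dict (outer over roots, inner absorbing later unabsorbed candidates) with a single pass over the count-sorted sequences that keeps a growing list of roots and assigns each sequence to the first earlier dominating root, or makes it a new root.
import Mathlib
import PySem

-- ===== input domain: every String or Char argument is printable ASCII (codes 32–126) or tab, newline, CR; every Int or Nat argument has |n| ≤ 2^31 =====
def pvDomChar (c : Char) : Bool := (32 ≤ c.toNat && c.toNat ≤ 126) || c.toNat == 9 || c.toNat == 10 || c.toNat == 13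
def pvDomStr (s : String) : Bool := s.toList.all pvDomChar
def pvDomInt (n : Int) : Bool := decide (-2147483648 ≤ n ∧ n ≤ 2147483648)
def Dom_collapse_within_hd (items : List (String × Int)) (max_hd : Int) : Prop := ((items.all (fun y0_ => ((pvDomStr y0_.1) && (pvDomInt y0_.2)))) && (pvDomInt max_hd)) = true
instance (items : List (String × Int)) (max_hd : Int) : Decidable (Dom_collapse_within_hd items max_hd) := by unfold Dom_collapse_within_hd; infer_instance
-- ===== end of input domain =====

-- B replaces A's nested root-scan with mutation of a parent dict by a single pass that keeps a
-- list of roots and assigns each sequence to the first earlier dominating root (alternative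
-- decomposition, same return value).

-- ===== PORT A =====
-- module helper (used by both programs)
def hamming_dist (a b : String) : Int :=
  if PySem.Str.len a ≠ PySem.Str.len b then
    max (PySem.Str.len a) (PySem.Str.len b)
  else
    ((a.toList.zip b.toList).map (fun p => if p.1 ≠ p.2 then (1 : Int) else 0)).sum

-- Python's counts[s] / parent[t] never miss (keys come from the dicts themselves), so getD's
-- defaults are never used.
def collapse_within_hd (items : List (String × Int)) (max_hd : Int) : List (String × String) :=
  let counts := PySem.Dict.ofList items
  let seqs := PySem.List.sorted counts.keys (fun s => counts.getD s 0) true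
  let parent0 := seqs.foldl (fun d s => d.insert s s) PySem.Dict.empty
  let parent := (PySem.List.enumerate seqs 0).foldl
    (fun parent p =>
      if parent.getD p.2 "" ≠ p.2 then parent
      else
        let s := p.2
        let c_hi := counts.getD s 0
        (PySem.List.slice seqs (some (p.1 + 1)) none).foldl
          (fun parent t =>
            if parent.getD t "" ≠ t then parent
            else if PySem.Str.len t ≠ PySem.Str.len s then parent
            else if hamming_dist s t ≤ max_hd then
              (if c_hi ≥ 2 * counts.getD t 0 - 1 then parent.insert t s else parent)
            else parent) parent) parent0
  parent.items

-- ===== PORT B =====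
def collapse_within_hd_alt (items : List (String × Int)) (max_hd : Int) : List (String × String) :=
  let counts := PySem.Dict.ofList items
  let seqs := PySem.List.sorted counts.keys (fun s => counts.getD s 0) true
  let st := seqs.foldl
    (fun (st : List String × PySem.Dict String String) s =>
      let c_lo := counts.getD s 0
      match st.1.find? (fun r =>
          PySem.Str.len r == PySem.Str.len s &&
          decide (hamming_dist r s ≤ max_hd) &&
          decide (counts.getD r 0 ≥ 2 * c_lo - 1)) with
      | some r => (st.1, st.2.insert s r)
      | none => (st.1 ++ [s], st.2.insert s s))
    ([], PySem.Dict.empty)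
  st.2.items

-- ===== PRECONDITION & SPEC =====
def Spec_collapse_within_hd (items : List (String × Int)) (max_hd : Int) (out : List (String × String)) : Prop := out = collapse_within_hd_alt items max_hd
instance (items : List (String × Int)) (max_hd : Int) (out : List (String × String)) : Decidable (Spec_collapse_within_hd items max_hd out) := by unfold Spec_collapse_within_hd; infer_instance

-- ===== CLAIM (what is proved, stated in full; the proofs are below) =====
def Claim_equal_collapse_within_hd : Prop := ∀ (items : List (String × Int)) (max_hd : Int), Dom_collapse_within_hd items max_hd → Spec_collapse_within_hd items max_hd (collapse_within_hd items max_hd)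

-- ===== LEMMAS AND PROOFS =====

-- the absorption condition (root r dominates candidate c)
def condAB (counts : PySem.Dict String Int) (max_hd : Int) (r c : String) : Bool :=
  PySem.Str.len r == PySem.Str.len c &&
  decide (hamming_dist r c ≤ max_hd) &&
  decide (counts.getD r 0 ≥ 2 * counts.getD c 0 - 1)

-- pure model of A's inner/outer loops, parent as a function
def updF (f : String → String) (t s : String) : String → String := fun x => if x = t then s else f x

def innerA (cond : String → String → Bool) (s : String) (f : String → String) (ts : List String) : String → String :=
  ts.foldl (fun f t => if f t ≠ t then f else if cond s t then updF f t s else f) f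

def outerA (cond : String → String → Bool) : (String → String) → List String → (String → String)
  | f, [] => f
  | f, s :: rest => outerA cond (if f s ≠ s then f else innerA cond s f rest) rest

-- pure model of B's single pass
def bmodel (cond : String → String → Bool) : List String → List String → List (String × String)
  | _, [] => []
  | roots, s :: rest =>
    match roots.find? (fun r => cond r s) with
    | some r => (s, r) :: bmodel cond roots rest
    | none => (s, s) :: bmodel cond (roots ++ [s]) rest

theorem innerA_not_mem (cond : String → String → Bool) (s : String) (ts : List String)
    (f : String → String) (x : String) (hx : x ∉ ts) : innerA cond s f ts x = f x := by
  induction ts generalizing f with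
  | nil => rfl
  | cons t ts ih =>
    simp only [innerA, List.foldl_cons] at *
    rw [ih _ (by simp at hx; exact hx.2)]
    have hxt : x ≠ t := by simp at hx; exact hx.1
    split_ifs <;> simp [updF, hxt]

theorem innerA_mem (cond : String → String → Bool) (s : String) (ts : List String)
    (f : String → String) (t : String) (hnd : ts.Nodup) (ht : t ∈ ts) :
    innerA cond s f ts t = if f t = t then (if cond s t then s else t) else f t := by
  induction ts generalizing f with
  | nil => simp at ht
  | cons u ts ih =>
    simp only [innerA, List.foldl_cons] at *
    rcases List.mem_cons.1 ht with h | h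
    · subst h
      have hnt : t ∉ ts := (List.nodup_cons.1 hnd).1
      rw [show (ts.foldl (fun f t => if f t ≠ t then f else if cond s t then updF f t s else f)
            (if f t ≠ t then f else if cond s t then updF f t s else f)) t =
          (if f t ≠ t then f else if cond s t then updF f t s else f) t from
          innerA_not_mem cond s ts _ t hnt]
      by_cases h1 : f t = t
      · by_cases h2 : cond s t
        · simp [h1, h2, updF]
        · simp [h1, h2]
      · simp [h1]
    · have hut : u ≠ t := by rintro rfl; exact (List.nodup_cons.1 hnd).1 h
      have hft : (if f u ≠ u then f else if cond s u then updF f u s else f) t = f t := by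
        split_ifs <;> simp [updF, Ne.symm hut]
      rw [ih _ (List.nodup_cons.1 hnd).2 h, hft]

theorem outerA_not_mem (cond : String → String → Bool) (rest : List String)
    (f : String → String) (x : String) (hx : x ∉ rest) : outerA cond f rest x = f x := by
  induction rest generalizing f with
  | nil => rfl
  | cons s rest ih =>
    simp only [outerA]
    rw [ih _ (by simp at hx; exact hx.2)]
    split_ifs with h
    · rfl
    · exact innerA_not_mem cond s rest f x (by simp at hx; exact hx.2)

theorem mainAB (cond : String → String → Bool) (rest roots : List String)
    (f : String → String) (hnd : rest.Nodup) (hdisj : ∀ t ∈ rest, t ∉ roots)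
    (hf : ∀ t ∈ rest, f t = ((roots.find? (fun r => cond r t)).getD t)) :
    rest.map (fun s => (s, outerA cond f rest s)) = bmodel cond roots rest := by
  induction rest generalizing roots f with
  | nil => rfl
  | cons s rest ih =>
    have hsnd := List.nodup_cons.1 hnd
    have hfs := hf s (List.mem_cons_self ..)
    simp only [List.map_cons, outerA, bmodel]
    cases hfind : roots.find? (fun r => cond r s) with
    | some r =>
      have hrr : r ∈ roots := List.mem_of_find?_eq_some hfind
      have hfs' : f s = r := by rw [hfs, hfind]; rfl
      have hne : f s ≠ s := by rw [hfs']; rintro rfl; exact hdisj _ (List.mem_cons_self ..) hrr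
      rw [if_pos hne]
      show (s, outerA cond f rest s) :: rest.map (fun s => (s, outerA cond f rest s)) =
        (s, r) :: bmodel cond roots rest
      rw [outerA_not_mem cond rest f s hsnd.1, hfs',
        ih roots f hsnd.2 (fun t ht => hdisj t (List.mem_cons_of_mem _ ht))
          (fun t ht => hf t (List.mem_cons_of_mem _ ht))]
    | none =>
      have hfs' : f s = s := by rw [hfs, hfind]; rfl
      rw [if_neg (by simp [hfs'])]
      show (s, outerA cond (innerA cond s f rest) rest s) ::
          rest.map (fun u => (u, outerA cond (innerA cond s f rest) rest u)) =
        (s, s) :: bmodel cond (roots ++ [s]) rest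
      rw [outerA_not_mem cond rest _ s hsnd.1, innerA_not_mem cond s rest f s hsnd.1, hfs']
      congr 1
      apply ih (roots ++ [s]) _ hsnd.2
      · intro t ht
        simp only [List.mem_append, List.mem_singleton]
        rintro (h | rfl)
        · exact hdisj t (List.mem_cons_of_mem _ ht) h
        · exact hsnd.1 ht
      · intro t ht
        rw [innerA_mem cond s rest f t hsnd.2 ht, hf t (List.mem_cons_of_mem _ ht),
          List.find?_append]
        cases hft : roots.find? (fun r => cond r t) with
        | some r =>
          have hrt : r ≠ t := by
            rintro rfl
            exact hdisj _ (List.mem_cons_of_mem _ ht) (List.mem_of_find?_eq_some hft)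
          simp [Option.getD, hrt]
        | none => by_cases hc : cond s t <;> simp [List.find?, hc]

-- dict-side mirror of A's loops
def AbodyD (counts : PySem.Dict String Int) (max_hd : Int) (s : String)
    (parent : PySem.Dict String String) (t : String) : PySem.Dict String String :=
  if parent.getD t "" ≠ t then parent
  else if PySem.Str.len t ≠ PySem.Str.len s then parent
  else if hamming_dist s t ≤ max_hd then
    (if counts.getD s 0 ≥ 2 * counts.getD t 0 - 1 then parent.insert t s else parent)
  else parent

def outerD (counts : PySem.Dict String Int) (max_hd : Int) :
    PySem.Dict String String → List String → PySem.Dict String String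
  | parent, [] => parent
  | parent, s :: rest => outerD counts max_hd
      (if parent.getD s "" ≠ s then parent else rest.foldl (AbodyD counts max_hd s) parent) rest

theorem getD_foldl_insert_self (l : List String) (d : PySem.Dict String String) (t : String) :
    (l.foldl (fun d s => d.insert s s) d).getD t "" = if t ∈ l then t else d.getD t "" := by
  induction l generalizing d with
  | nil => simp
  | cons s l ih =>
    simp only [List.foldl_cons, ih, PySem.Dict.getD_insert]
    by_cases h : t = s <;> by_cases h2 : t ∈ l <;> simp [h, h2]

theorem enum_shape (counts : PySem.Dict String Int) (max_hd : Int) (seqs : List String) :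
    ∀ (l : List String) (k : Nat) (parent : PySem.Dict String String), l = seqs.drop k →
    (PySem.List.enumerate l (k : Int)).foldl
      (fun parent (p : Int × String) =>
        if parent.getD p.2 "" ≠ p.2 then parent
        else (PySem.List.slice seqs (some (p.1 + 1)) none).foldl (AbodyD counts max_hd p.2) parent)
      parent = outerD counts max_hd parent l := by
  intro l
  induction l with
  | nil => intro k parent h; rfl
  | cons s l ih =>
    intro k parent h
    have hdrop : seqs.drop (k + 1) = l := by
      have := congrArg (List.drop 1) h.symm
      simpa [List.drop_drop, Nat.add_comm] using this
    rw [PySem.List.enumerate_cons, List.foldl_cons]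
    have hsl : PySem.List.slice seqs (some ((k : Int) + 1)) none = l := by
      rw [show ((k : Int) + 1) = ((k + 1 : Nat) : Int) by push_cast; ring,
        PySem.List.slice_from_natCast, hdrop]
    simp only [hsl]
    rw [show ((k : Int) + 1) = ((k + 1 : Nat) : Int) by push_cast; ring]
    rw [ih (k + 1) _ hdrop.symm]
    rfl

theorem AbodyD_char (counts : PySem.Dict String Int) (max_hd : Int) (s : String)
    (parent : PySem.Dict String String) (t : String) :
    AbodyD counts max_hd s parent t =
    if parent.getD t "" ≠ t then parent
    else if condAB counts max_hd s t then parent.insert t s else parent := by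
  unfold AbodyD condAB
  by_cases h1 : parent.getD t "" ≠ t
  · rw [if_pos h1, if_pos h1]
  · rw [if_neg h1, if_neg h1]
    by_cases h2 : PySem.Str.len t ≠ PySem.Str.len s
    · rw [if_pos h2, if_neg ?_]
      simp only [Bool.and_eq_true, beq_iff_eq, decide_eq_true_eq]
      rintro ⟨⟨hl, _⟩, _⟩; exact h2 hl.symm
    · rw [if_neg h2]
      rw [not_ne_iff] at h2
      by_cases h3 : hamming_dist s t ≤ max_hd
      · rw [if_pos h3]
        by_cases h4 : counts.getD s 0 ≥ 2 * counts.getD t 0 - 1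
        · rw [if_pos h4, if_pos ?_]
          simp only [Bool.and_eq_true, beq_iff_eq, decide_eq_true_eq]
          exact ⟨⟨h2.symm, h3⟩, h4⟩
        · rw [if_neg h4, if_neg ?_]
          simp only [Bool.and_eq_true, beq_iff_eq, decide_eq_true_eq]
          rintro ⟨_, h⟩; exact h4 h
      · rw [if_neg h3, if_neg ?_]
        simp only [Bool.and_eq_true, beq_iff_eq, decide_eq_true_eq]
        rintro ⟨⟨_, h⟩, _⟩; exact h3 h

theorem innerDA (counts : PySem.Dict String Int) (max_hd : Int) (s : String) (ts : List String)
    (parent : PySem.Dict String String) (x : String) :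
    (ts.foldl (AbodyD counts max_hd s) parent).getD x "" =
    innerA (condAB counts max_hd) s (fun y => parent.getD y "") ts x := by
  induction ts generalizing parent with
  | nil => rfl
  | cons t ts ih =>
    simp only [List.foldl_cons, innerA, List.foldl_cons]
    rw [show (ts.foldl (AbodyD counts max_hd s) (AbodyD counts max_hd s parent t)).getD x "" =
        innerA (condAB counts max_hd) s (fun y => (AbodyD counts max_hd s parent t).getD y "") ts x
        from ih _]
    have hfun : (fun y => (AbodyD counts max_hd s parent t).getD y "") =
        (fun f t => if f t ≠ t then f else if condAB counts max_hd s t then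
          updF f t s else f) (fun y => parent.getD y "") t := by
      funext y
      rw [AbodyD_char]
      show _ = (if (fun y => parent.getD y "") t ≠ t then (fun y => parent.getD y "")
          else if condAB counts max_hd s t then updF (fun y => parent.getD y "") t s
          else (fun y => parent.getD y "")) y
      by_cases h1 : parent.getD t "" ≠ t
      · rw [if_pos h1, if_pos (show (fun y => parent.getD y "") t ≠ t from h1)]
      · rw [if_neg h1, if_neg (show ¬ (fun y => parent.getD y "") t ≠ t from h1)]
        by_cases hc : condAB counts max_hd s t
        · rw [if_pos hc, if_pos hc, PySem.Dict.getD_insert]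
          rfl
        · rw [if_neg hc, if_neg hc]
    rw [hfun]
    rfl

theorem keys_AbodyD (counts : PySem.Dict String Int) (max_hd : Int) (s t : String)
    (parent : PySem.Dict String String) (h : t ∈ parent.keys) :
    (AbodyD counts max_hd s parent t).keys = parent.keys := by
  unfold AbodyD
  split_ifs <;> first
    | rfl
    | exact PySem.Dict.keys_insert_of_contains _ _ ((PySem.Dict.contains_iff_mem_keys _ _).2 h)

theorem keys_AbodyD_foldl (counts : PySem.Dict String Int) (max_hd : Int) (s : String)
    (ts : List String) (parent : PySem.Dict String String) (h : ∀ t ∈ ts, t ∈ parent.keys) :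
    (ts.foldl (AbodyD counts max_hd s) parent).keys = parent.keys := by
  induction ts generalizing parent with
  | nil => rfl
  | cons t ts ih =>
    have hk := keys_AbodyD counts max_hd s t parent (h t (List.mem_cons_self ..))
    rw [List.foldl_cons, ih _ (fun u hu => hk ▸ h u (List.mem_cons_of_mem _ hu)), hk]

theorem keys_outerD (counts : PySem.Dict String Int) (max_hd : Int) (rest : List String)
    (parent : PySem.Dict String String) (h : ∀ t ∈ rest, t ∈ parent.keys) :
    (outerD counts max_hd parent rest).keys = parent.keys := by
  induction rest generalizing parent with
  | nil => rfl
  | cons s rest ih =>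
    have hk : (if parent.getD s "" ≠ s then parent
        else rest.foldl (AbodyD counts max_hd s) parent).keys = parent.keys := by
      split_ifs
      · rfl
      · exact keys_AbodyD_foldl counts max_hd s rest parent
          (fun t ht => h t (List.mem_cons_of_mem _ ht))
    rw [outerD, ih _ (fun t ht => hk ▸ h t (List.mem_cons_of_mem _ ht)), hk]

theorem outerDA (counts : PySem.Dict String Int) (max_hd : Int) (rest : List String)
    (parent : PySem.Dict String String) (x : String) :
    (outerD counts max_hd parent rest).getD x "" =
    outerA (condAB counts max_hd) (fun y => parent.getD y "") rest x := by
  induction rest generalizing parent with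
  | nil => rfl
  | cons s rest ih =>
    rw [outerD, outerA, ih]
    congr 1
    funext y
    split_ifs with h1
    · rfl
    · exact innerDA counts max_hd s rest parent y

theorem bfoldB (counts : PySem.Dict String Int) (max_hd : Int) (l : List String)
    (roots : List String) (d : PySem.Dict String String)
    (hnd : l.Nodup) (hfresh : ∀ s ∈ l, d.contains s = false) :
    (l.foldl (fun (st : List String × PySem.Dict String String) s =>
        match st.1.find? (fun r => condAB counts max_hd r s) with
        | some r => (st.1, st.2.insert s r)
        | none => (st.1 ++ [s], st.2.insert s s)) (roots, d)).2.items
    = d.items ++ bmodel (condAB counts max_hd) roots l := by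
  induction l generalizing roots d with
  | nil => simp [bmodel]
  | cons s l ih =>
    have hfs := hfresh s (List.mem_cons_self ..)
    have hfresh' : ∀ t v, t ∈ l → (d.insert s v).contains t = false := by
      intro t v ht
      rw [PySem.Dict.contains_insert]
      have : t ≠ s := by rintro rfl; exact (List.nodup_cons.1 hnd).1 ht
      simp [this, hfresh t (List.mem_cons_of_mem _ ht)]
    rw [List.foldl_cons, bmodel]
    cases hfind : roots.find? (fun r => condAB counts max_hd r s) with
    | some r =>
      show (l.foldl (fun (st : List String × PySem.Dict String String) s =>
          match st.1.find? (fun r => condAB counts max_hd r s) with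
          | some r => (st.1, st.2.insert s r)
          | none => (st.1 ++ [s], st.2.insert s s)) (roots, d.insert s r)).2.items =
        d.items ++ ((s, r) :: bmodel (condAB counts max_hd) roots l)
      rw [ih roots _ (List.nodup_cons.1 hnd).2 (fun t ht => hfresh' t r ht),
        PySem.Dict.items_insert_of_not_contains _ _ hfs]
      simp
    | none =>
      show (l.foldl (fun (st : List String × PySem.Dict String String) s =>
          match st.1.find? (fun r => condAB counts max_hd r s) with
          | some r => (st.1, st.2.insert s r)
          | none => (st.1 ++ [s], st.2.insert s s)) (roots ++ [s], d.insert s s)).2.items =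
        d.items ++ ((s, s) :: bmodel (condAB counts max_hd) (roots ++ [s]) l)
      rw [ih (roots ++ [s]) _ (List.nodup_cons.1 hnd).2 (fun t ht => hfresh' t s ht),
        PySem.Dict.items_insert_of_not_contains _ _ hfs]
      simp

-- ===== VERDICT (by name: the statement is the Claim_ definition above) =====
theorem collapse_within_hd_spec : Claim_equal_collapse_within_hd := by
  intro items max_hd _
  unfold Spec_collapse_within_hd collapse_within_hd collapse_within_hd_alt
  set counts := PySem.Dict.ofList items with hc
  set seqs := PySem.List.sorted counts.keys (fun s => counts.getD s 0) true with hs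
  have hseqnd : seqs.Nodup :=
    ((PySem.List.sorted_perm counts.keys (fun s => counts.getD s 0) true).nodup_iff).2
      (PySem.Dict.nodup_keys_ofList items)
  set parent0 := seqs.foldl (fun d s => d.insert s s) PySem.Dict.empty with hp0
  have hkeys0 : parent0.keys = seqs := by
    rw [hp0, PySem.Dict.keys_foldl_insert seqs (fun _ s => s) PySem.Dict.empty]
    simp [PySem.Dict.keys_empty, PySem.Set.update_nil_left,
      PySem.Set.ofList_eq_self_of_nodup seqs hseqnd]
  refine Eq.trans (congrArg PySem.Dict.items
    (enum_shape counts max_hd seqs seqs 0 parent0 (by simp))) ?_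
  refine Eq.trans ?_ (bfoldB counts max_hd seqs [] PySem.Dict.empty hseqnd
    (fun s _ => PySem.Dict.contains_empty s)).symm
  have hkeysF : (outerD counts max_hd parent0 seqs).keys = seqs := by
    rw [keys_outerD counts max_hd seqs parent0 (fun t ht => hkeys0.symm ▸ ht), hkeys0]
  rw [PySem.Dict.items_eq_map_keys _ (by rw [hkeysF]; exact hseqnd) "", hkeysF]
  have hmap : seqs.map (fun k => (k, (outerD counts max_hd parent0 seqs).getD k "")) =
      seqs.map (fun k => (k, outerA (condAB counts max_hd)
        (fun y => parent0.getD y "") seqs k)) := by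
    apply List.map_congr_left
    intro k _
    rw [outerDA]
  rw [hmap, mainAB (condAB counts max_hd) seqs [] _ hseqnd (by simp)
    (fun t ht => by simp [hp0, getD_foldl_insert_self, ht])]
  rfl
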